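-- pv_equiv track=rewrite | github.com/chay116/Algorithm | secret/2022 공채/4.py | solution
-- ===== SOURCE A (Python) =====
-- def solution(n, info):
-- 	answer = [0 for _ in range(11)]
-- 	real_answer = [0 for _ in range(11)]
-- 	result = [0]
--
-- 	def scoring(score):
-- 		if score <= 0:
-- 			return
-- 		if result[0] == score:
-- 			for i in range(11):
-- 				if real_answer[10 - i] > answer[10 - i]:
-- 					return
-- 				if real_answer[10 - i] < answer[10 - i]:
-- 					break
-- 			for i in range(11):
-- 				real_answer[i] = answer[i]
-- 			result[0] = score
-- 		if result[0] < score: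
-- 			for i in range(11):
-- 				real_answer[i] = answer[i]
-- 			result[0] = score
--
--
-- 	def dfs(i, j, score, max_try):
-- 		if j == 11:
-- 			answer[10] = max_try - i
-- 			scoring(score)
-- 			answer[10] = 0
-- 			return
-- 		if max_try - i > info[j]:
-- 			answer[j] = info[j] + 1
-- 			dfs(i + info[j] + 1, j + 1, score + 10 - j, max_try)
-- 			answer[j] = 0
-- 		if info[j] == 0:
-- 			dfs(i, j + 1, score, max_try)
-- 		else:
-- 			dfs(i, j + 1, score - 10 + j, max_try)
--
-- 	dfs(0, 0, 0, n)
-- 	if result[0] == 0: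
-- 		return [-1]
-- 	return real_answer
--
-- n = 9
--
-- info = [0,0,1,2,0,1,1,1,1,1,1]
-- ===== SOURCE B (Python) =====
-- # B: flat enumeration of all 2048 win/lose bit-vectors instead of A's stateful recursive DFS.
-- def solution(n, info):
--     # all 2048 win/lose bit-vectors (zone 0 first), 1-before-0 order
--     bitlists = [[]]
--     for _ in range(11):
--         bitlists = [[b] + t for b in (1, 0) for t in bitlists]
--     best = None  # (key, candidate) with key = (score, candidate reversed)
--     for bits in bitlists:
--         spent = 0
--         score = 0
--         cand = []
--         feasible = True
--         for j, b in enumerate(bits):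
--             if b:
--                 if n - spent <= info[j]:
--                     feasible = False
--                     break
--                 spent += info[j] + 1
--                 score += 10 - j
--                 cand.append(info[j] + 1)
--             else:
--                 cand.append(0)
--                 if info[j] != 0:
--                     score -= 10 - j
--         if not feasible:
--             continue
--         if score > 0:
--             cand[10] = n - spent  # leftover arrows dumped in the 0-score zone
--             key = (score, list(reversed(cand)))
--             if best is None or key > best[0]:
--                 best = (key, cand)
--     return best[1] if best else [-1]
-- ===== Notes on version B (the rewrite author's own statement) =====
-- stated objective: simpler
-- what changed: Replaces the recursive DFS with shared mutable state (answer/real_answer/result mutated across nested scoring/dfs closures) by a flat loop over all 2048 precomputed win/lose bit-vectors, scanning each to build the candidate and keeping the best via a direct (score, reversed-candidate) key comparison.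
import Mathlib
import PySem

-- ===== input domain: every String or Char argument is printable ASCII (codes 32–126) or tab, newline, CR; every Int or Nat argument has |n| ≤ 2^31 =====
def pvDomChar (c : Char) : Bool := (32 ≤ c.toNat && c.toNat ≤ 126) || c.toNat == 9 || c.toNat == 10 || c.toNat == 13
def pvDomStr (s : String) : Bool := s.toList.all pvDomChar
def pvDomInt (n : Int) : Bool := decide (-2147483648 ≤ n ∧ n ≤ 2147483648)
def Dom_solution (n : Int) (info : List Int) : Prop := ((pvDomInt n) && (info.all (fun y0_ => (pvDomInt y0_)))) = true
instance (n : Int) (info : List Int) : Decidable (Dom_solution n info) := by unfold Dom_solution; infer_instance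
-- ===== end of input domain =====

-- B replaces A's stateful recursive DFS by a flat loop over all 2048 win/lose bit-vectors
-- with a direct (score, reversed-candidate) best-key comparison; same cost, simpler structure.

-- ===== PORT A =====
-- A's internal lists answer/real_answer always have length 11 and are indexed in range,
-- so their indexing is ported exactly with getD; info[j] (j ≤ 10) is in range on Pre_.

-- the tie-break loop of `scoring`: true = "return" (keep the old real_answer)
def keepOld (real ans : List Int) (i : Nat) : Bool :=
  if i ≥ 11 then false
  else if real.getD (10 - i) 0 > ans.getD (10 - i) 0 then true
  else if real.getD (10 - i) 0 < ans.getD (10 - i) 0 then false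
  else keepOld real ans (i + 1)
termination_by 11 - i

def scoring (score : Int) (answer real : List Int) (result : Int) : List Int × Int :=
  if score ≤ 0 then (real, result)
  else
    let p := if result = score then
               (if keepOld real answer 0 then (real, result) else (answer, score))
             else (real, result)
    if p.2 < score then (answer, score) else p

-- A's dfs; the mutable answer/real_answer/result cells are threaded functionally
-- (Python's `answer[j] = 0` restores after the recursive call, which passing the
-- unmodified list to the next call reproduces exactly).
def dfsA (info : List Int) (maxTry : Int) (j : Nat) (i score : Int)
    (answer real : List Int) (result : Int) : List Int × Int :=
  if j ≥ 11 then scoring score (answer.set 10 (maxTry - i)) real result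
  else
    let ij := info.getD j 0
    let st := if maxTry - i > ij then
        dfsA info maxTry (j + 1) (i + ij + 1) (score + 10 - (j : Int)) (answer.set j (ij + 1)) real result
      else (real, result)
    if ij = 0 then dfsA info maxTry (j + 1) i score answer st.1 st.2
    else dfsA info maxTry (j + 1) i (score - 10 + (j : Int)) answer st.1 st.2
termination_by 11 - j

def solution (n : Int) (info : List Int) : List Int :=
  let st := dfsA info n 0 0 0 (List.replicate 11 0) (List.replicate 11 0) 0
  if st.2 = 0 then [-1] else st.1

-- ===== PORT B =====
-- Python list `>` comparison (lexicographic, longer wins over its proper prefix)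
def listGt : List Int → List Int → Bool
  | _ :: _, [] => true
  | [], _ => false
  | a :: as, b :: bs => if a > b then true else if a < b then false else listGt as bs

-- Python tuple comparison on keys (score, reversed candidate)
def keyGt (k1 k2 : Int × List Int) : Bool :=
  if k1.1 > k2.1 then true else if k1.1 < k2.1 then false else listGt k1.2 k2.2

-- the inner `for j, b in enumerate(bits)` loop; none = break (infeasible)
def scanBits (n : Int) (info : List Int) (j : Nat) (spent score : Int) (cand : List Int) :
    List Int → Option (Int × List Int)
  | [] => some (score, cand.set 10 (n - spent))
  | b :: bs =>
    let ij := info.getD j 0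
    if b ≠ 0 then
      if n - spent ≤ ij then none
      else scanBits n info (j + 1) (spent + ij + 1) (score + 10 - (j : Int)) (cand ++ [ij + 1]) bs
    else scanBits n info (j + 1) spent (if ij ≠ 0 then score - 10 + (j : Int) else score) (cand ++ [0]) bs

def updateBest (best : Option ((Int × List Int) × List Int)) (score : Int) (cand : List Int) :
    Option ((Int × List Int) × List Int) :=
  if score > 0 then
    match best with
    | none => some ((score, cand.reverse), cand)
    | some b => if keyGt (score, cand.reverse) b.1 then some ((score, cand.reverse), cand) else best
  else best

def stepB (n : Int) (info : List Int) (best : Option ((Int × List Int) × List Int))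
    (bits : List Int) : Option ((Int × List Int) × List Int) :=
  match scanBits n info 0 0 0 [] bits with
  | none => best
  | some sc => updateBest best sc.1 sc.2

def solution_alt (n : Int) (info : List Int) : List Int :=
  let bl := (List.range 11).foldl (fun L _ => L.map (1 :: ·) ++ L.map (0 :: ·)) [[]]
  match bl.foldl (stepB n info) none with
  | none => [-1]
  | some b => b.2

-- ===== PRECONDITION & SPEC =====
-- A indexes info[0..10]; on shorter lists Python raises IndexError, so those are excluded.
def Pre_solution (n : Int) (info : List Int) : Prop := 11 ≤ info.length
instance (n : Int) (info : List Int) : Decidable (Pre_solution n info) := by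
  unfold Pre_solution; infer_instance

def pvWitness_solution : Int × List Int := (9, [0, 0, 1, 2, 0, 1, 1, 1, 1, 1, 1])

def Spec_solution (n : Int) (info : List Int) (out : List Int) : Prop := out = solution_alt n info
instance (n : Int) (info : List Int) (out : List Int) : Decidable (Spec_solution n info out) := by
  unfold Spec_solution; infer_instance

-- ===== CLAIM (what is proved, stated in full; the proofs are below) =====
def Claim_equal_solution : Prop := ∀ (n : Int) (info : List Int), Dom_solution n info →
  Pre_solution n info → Spec_solution n info (solution n info)

-- ===== LEMMAS AND PROOFS =====

-- proof-side recursive form of the bit-vector list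
def bitlists : Nat → List (List Int)
  | 0 => [[]]
  | k + 1 => (bitlists k).map (1 :: ·) ++ (bitlists k).map (0 :: ·)

lemma bitlists_foldl (m : Nat) :
    (List.range m).foldl (fun L _ => L.map ((1 : Int) :: ·) ++ L.map ((0 : Int) :: ·)) [[]] = bitlists m := by
  induction m with
  | zero => rfl
  | succ m ih => rw [List.range_succ, List.foldl_append, ih]; rfl

-- simulation relation between A's (real_answer, result) and B's best
def SimRel (real : List Int) (result : Int) (best : Option ((Int × List Int) × List Int)) : Prop :=
  (result = 0 ∧ real = List.replicate 11 0 ∧ best = none) ∨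
  (0 < result ∧ real.length = 11 ∧ best = some ((result, real.reverse), real))

lemma listGt_asymm : ∀ a b : List Int, listGt a b = true → listGt b a = false := by
  intro a
  induction a with
  | nil => intro b h; cases b <;> simp [listGt] at h
  | cons x xs ih =>
    intro b h
    cases b with
    | nil => simp [listGt]
    | cons y ys =>
      simp only [listGt] at h ⊢
      by_cases h1 : x > y
      · simp [h1]; omega
      · by_cases h2 : x < y
        · simp [h1, h2] at h
        · have : x = y := by omega
          simp [h1, h2, this, lt_irrefl] at h ⊢
          exact ih ys h

lemma listGt_trichotomy : ∀ a b : List Int, listGt a b = false → listGt b a = false → a = b := by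
  intro a
  induction a with
  | nil => intro b h1 h2; cases b with
           | nil => rfl
           | cons y ys => simp [listGt] at h2
  | cons x xs ih =>
    intro b h1 h2
    cases b with
    | nil => simp [listGt] at h1
    | cons y ys =>
      simp only [listGt] at h1 h2
      by_cases hxy : x > y
      · simp [hxy] at h1
      · by_cases hyx : y > x
        · simp [hyx, show ¬ y < x by omega] at h2
        · have hxyeq : x = y := by omega
          subst hxyeq
          simp [lt_irrefl] at h1 h2
          rw [ih ys h1 h2]

lemma keepOld_eq_listGt (u v : List Int) (hu : u.length = 11) (hv : v.length = 11) :
    ∀ i, i ≤ 11 → keepOld u v i = listGt (u.reverse.drop i) (v.reverse.drop i) := by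
  intro i hi
  induction h : 11 - i generalizing i with
  | zero =>
    have : i = 11 := by omega
    subst this
    rw [keepOld]
    simp [List.drop_eq_nil_of_le (by simp [hu] : u.reverse.length ≤ 11),
          List.drop_eq_nil_of_le (by simp [hv] : v.reverse.length ≤ 11), listGt]
  | succ m ihm =>
    have hilt : i < 11 := by omega
    have hru : i < u.reverse.length := by simp [hu]; omega
    have hrv : i < v.reverse.length := by simp [hv]; omega
    have hgu : u.reverse[i]'hru = u.getD (10 - i) 0 := by
      rw [List.getElem_reverse]
      rw [List.getD_eq_getElem u 0 (by omega : 10 - i < u.length)]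
      congr 1; omega
    have hgv : v.reverse[i]'hrv = v.getD (10 - i) 0 := by
      rw [List.getElem_reverse]
      rw [List.getD_eq_getElem v 0 (by omega : 10 - i < v.length)]
      congr 1; omega
    rw [keepOld, if_neg (by omega : ¬ i ≥ 11),
        List.drop_eq_getElem_cons hru, List.drop_eq_getElem_cons hrv, listGt, hgu, hgv]
    split_ifs with h1 h2
    · rfl
    · rfl
    · exact ihm (i + 1) (by omega) (by omega)

-- evaluation equations for scoring and updateBest
lemma scoring_nonpos (s : Int) (a r : List Int) (res : Int) (h : s ≤ 0) :
    scoring s a r res = (r, res) := by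
  simp [scoring, h]

lemma scoring_tie_keep (s : Int) (a r : List Int) (res : Int) (h : ¬ s ≤ 0) (he : res = s)
    (hk : keepOld r a 0 = true) : scoring s a r res = (r, res) := by
  subst he
  simp [scoring, h, hk]

lemma scoring_tie_repl (s : Int) (a r : List Int) (res : Int) (h : ¬ s ≤ 0) (he : res = s)
    (hk : keepOld r a 0 = false) : scoring s a r res = (a, s) := by
  subst he
  simp [scoring, h, hk]

lemma scoring_lt (s : Int) (a r : List Int) (res : Int) (h : ¬ s ≤ 0) (hne : res ≠ s)
    (hlt : res < s) : scoring s a r res = (a, s) := by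
  simp [scoring, h, hne, hlt]

lemma scoring_gt (s : Int) (a r : List Int) (res : Int) (h : ¬ s ≤ 0) (hne : res ≠ s)
    (hge : ¬ res < s) : scoring s a r res = (r, res) := by
  simp [scoring, h, hne, hge]

lemma updateBest_nonpos (best : Option ((Int × List Int) × List Int)) (s : Int) (c : List Int)
    (h : ¬ s > 0) : updateBest best s c = best := by
  simp [updateBest, h]

lemma updateBest_none (s : Int) (c : List Int) (h : s > 0) :
    updateBest none s c = some ((s, c.reverse), c) := by
  simp [updateBest, h]

lemma updateBest_some (b : (Int × List Int) × List Int) (s : Int) (c : List Int) (h : s > 0) :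
    updateBest (some b) s c =
      if keyGt (s, c.reverse) b.1 then some ((s, c.reverse), c) else some b := by
  simp [updateBest, h]

-- one candidate recorded: A's scoring matches B's updateBest through SimRel
lemma scoring_sim (s : Int) (cand real : List Int) (result : Int)
    (best : Option ((Int × List Int) × List Int))
    (hc : cand.length = 11) (hinv : SimRel real result best) :
    SimRel (scoring s cand real result).1 (scoring s cand real result).2 (updateBest best s cand) := by
  by_cases hs : s ≤ 0
  · rw [scoring_nonpos _ _ _ _ hs, updateBest_nonpos _ _ _ (by omega)]
    exact hinv
  · have hspos : (0 : Int) < s := by omega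
    rcases hinv with ⟨h0, hreal, hbest⟩ | ⟨hpos, hlen, hbest⟩
    · subst hbest
      rw [scoring_lt _ _ _ _ hs (by omega) (by omega), updateBest_none _ _ hspos]
      right
      exact ⟨hspos, hc, rfl⟩
    · subst hbest
      have hkey : keepOld real cand 0 = listGt real.reverse cand.reverse := by
        simpa using keepOld_eq_listGt real cand hlen hc 0 (by omega)
      rw [updateBest_some _ _ _ hspos]
      by_cases hrs : result = s
      · subst hrs
        have hkgt : keyGt (result, cand.reverse) (result, real.reverse) =
            listGt cand.reverse real.reverse := by
          simp [keyGt]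
        rw [hkgt]
        by_cases hgt : listGt real.reverse cand.reverse = true
        · have hgt2 : listGt cand.reverse real.reverse = false := listGt_asymm _ _ hgt
          rw [scoring_tie_keep _ _ _ _ hs rfl (hkey.trans hgt), hgt2, if_neg (by simp)]
          right; exact ⟨hpos, hlen, rfl⟩
        · have hko : keepOld real cand 0 = false := by
            rw [hkey]; exact Bool.eq_false_iff.mpr hgt
          rw [scoring_tie_repl _ _ _ _ hs rfl hko]
          by_cases hgt3 : listGt cand.reverse real.reverse = true
          · rw [hgt3, if_pos rfl]
            right; exact ⟨hpos, hc, rfl⟩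
          · have heq : cand.reverse = real.reverse :=
              listGt_trichotomy _ _ (Bool.eq_false_iff.mpr hgt3) (Bool.eq_false_iff.mpr hgt)
            have heq2 : cand = real := by
              have := congrArg List.reverse heq; simpa using this
            rw [Bool.eq_false_iff.mpr hgt3, if_neg (by simp)]
            right
            exact ⟨hpos, hc, by rw [heq2]⟩
      · by_cases hlt : result < s
        · rw [scoring_lt _ _ _ _ hs hrs hlt, if_pos (by simp [keyGt, hlt])]
          right; exact ⟨hspos, hc, rfl⟩
        · rw [scoring_gt _ _ _ _ hs hrs hlt,
              if_neg (by simp [keyGt, show ¬ result < s from hlt, show s < result by omega])]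
          right; exact ⟨hpos, hlen, rfl⟩

lemma foldl_const {α β : Type} (l : List β) (b : α) :
    List.foldl (fun (x : α) (_ : β) => x) b l = b := by
  induction l generalizing b with
  | nil => rfl
  | cons x xs ih => simpa using ih b

-- the step of B's fold, parameterised by the scan starting point
def stepAt (n : Int) (info : List Int) (j : Nat) (i s : Int) (pre : List Int)
    (bst : Option ((Int × List Int) × List Int)) (bs : List Int) :
    Option ((Int × List Int) × List Int) :=
  match scanBits n info j i s pre bs with
  | none => bst
  | some sc => updateBest bst sc.1 sc.2

lemma scanBits_one (n : Int) (info : List Int) (j : Nat) (i s : Int) (pre bs : List Int) :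
    scanBits n info j i s pre (1 :: bs) =
      if n - i ≤ info.getD j 0 then none
      else scanBits n info (j + 1) (i + info.getD j 0 + 1) (s + 10 - (j : Int))
        (pre ++ [info.getD j 0 + 1]) bs := by
  simp [scanBits]

lemma scanBits_zero (n : Int) (info : List Int) (j : Nat) (i s : Int) (pre bs : List Int) :
    scanBits n info j i s pre (0 :: bs) =
      scanBits n info (j + 1) i (if info.getD j 0 ≠ 0 then s - 10 + (j : Int) else s)
        (pre ++ [0]) bs := by
  simp [scanBits]

lemma stepAt_one (n : Int) (info : List Int) (j : Nat) (i s : Int) (pre : List Int)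
    (bst : Option ((Int × List Int) × List Int)) (bs : List Int) :
    stepAt n info j i s pre bst (1 :: bs) =
      if n - i ≤ info.getD j 0 then bst
      else stepAt n info (j + 1) (i + info.getD j 0 + 1) (s + 10 - (j : Int))
        (pre ++ [info.getD j 0 + 1]) bst bs := by
  rw [stepAt, scanBits_one]
  by_cases h : n - i ≤ info.getD j 0
  · rw [if_pos h, if_pos h]
  · rw [if_neg h, if_neg h]; rfl

lemma stepAt_zero (n : Int) (info : List Int) (j : Nat) (i s : Int) (pre : List Int)
    (bst : Option ((Int × List Int) × List Int)) (bs : List Int) :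
    stepAt n info j i s pre bst (0 :: bs) =
      stepAt n info (j + 1) i (if info.getD j 0 ≠ 0 then s - 10 + (j : Int) else s)
        (pre ++ [0]) bst bs := by
  rw [stepAt, scanBits_zero]; rfl

lemma main_sim (n : Int) (info : List Int) :
    ∀ k j, j + k = 11 → ∀ (i s : Int) (pre : List Int), pre.length = j →
    ∀ (real : List Int) (result : Int) best, SimRel real result best →
    SimRel (dfsA info n j i s (pre ++ List.replicate k 0) real result).1
        (dfsA info n j i s (pre ++ List.replicate k 0) real result).2
        ((bitlists k).foldl (stepAt n info j i s pre) best) := by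
  intro k
  induction k with
  | zero =>
    intro j hj i s pre hpre real result best hinv
    have hj11 : j = 11 := by omega
    subst hj11
    rw [dfsA, if_pos (by omega : 11 ≥ 11), show pre ++ List.replicate 0 (0 : Int) = pre by simp]
    show SimRel _ _ ((bitlists 0).foldl (stepAt n info 11 i s pre) best)
    rw [show (bitlists 0).foldl (stepAt n info 11 i s pre) best
          = updateBest best s (pre.set 10 (n - i)) from rfl]
    exact scoring_sim s (pre.set 10 (n - i)) real result best (by simp [hpre]) hinv
  | succ k ih =>
    intro j hj i s pre hpre real result best hinv
    have hjlt : j < 11 := by omega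
    have hd : dfsA info n j i s (pre ++ List.replicate (k + 1) 0) real result
        = (if info.getD j 0 = 0 then
             dfsA info n (j + 1) i s (pre ++ List.replicate (k + 1) 0)
               (if n - i > info.getD j 0 then
                  dfsA info n (j + 1) (i + info.getD j 0 + 1) (s + 10 - (j : Int))
                    ((pre ++ List.replicate (k + 1) 0).set j (info.getD j 0 + 1)) real result
                else (real, result)).1
               (if n - i > info.getD j 0 then
                  dfsA info n (j + 1) (i + info.getD j 0 + 1) (s + 10 - (j : Int))
                    ((pre ++ List.replicate (k + 1) 0).set j (info.getD j 0 + 1)) real result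
                else (real, result)).2
           else
             dfsA info n (j + 1) i (s - 10 + (j : Int)) (pre ++ List.replicate (k + 1) 0)
               (if n - i > info.getD j 0 then
                  dfsA info n (j + 1) (i + info.getD j 0 + 1) (s + 10 - (j : Int))
                    ((pre ++ List.replicate (k + 1) 0).set j (info.getD j 0 + 1)) real result
                else (real, result)).1
               (if n - i > info.getD j 0 then
                  dfsA info n (j + 1) (i + info.getD j 0 + 1) (s + 10 - (j : Int))
                    ((pre ++ List.replicate (k + 1) 0).set j (info.getD j 0 + 1)) real result
                else (real, result)).2) := by
      rw [dfsA, if_neg (by omega : ¬ j ≥ 11)]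
    rw [hd]
    have hsplit : (bitlists (k + 1)).foldl (stepAt n info j i s pre) best
        = (bitlists k).foldl (fun bst bs => stepAt n info j i s pre bst (0 :: bs))
            ((bitlists k).foldl (fun bst bs => stepAt n info j i s pre bst (1 :: bs)) best) := by
      rw [show bitlists (k + 1)
            = (bitlists k).map ((1 : Int) :: ·) ++ (bitlists k).map ((0 : Int) :: ·) from rfl,
          List.foldl_append, List.foldl_map, List.foldl_map]
    rw [hsplit]
    -- the win half of the fold simulates the first branch of dfs
    have hwin : SimRel
        (if n - i > info.getD j 0 then
            dfsA info n (j + 1) (i + info.getD j 0 + 1) (s + 10 - (j : Int))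
              ((pre ++ List.replicate (k + 1) 0).set j (info.getD j 0 + 1)) real result
          else (real, result)).1
        (if n - i > info.getD j 0 then
            dfsA info n (j + 1) (i + info.getD j 0 + 1) (s + 10 - (j : Int))
              ((pre ++ List.replicate (k + 1) 0).set j (info.getD j 0 + 1)) real result
          else (real, result)).2
        ((bitlists k).foldl (fun bst bs => stepAt n info j i s pre bst (1 :: bs)) best) := by
      by_cases hfe : n - i > info.getD j 0
      · have hset : (pre ++ List.replicate (k + 1) (0 : Int)).set j (info.getD j 0 + 1)
            = (pre ++ [info.getD j 0 + 1]) ++ List.replicate k 0 := by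
          rw [show List.replicate (k + 1) (0 : Int) = 0 :: List.replicate k 0 from rfl,
              List.set_append_right _ _ (by omega : pre.length ≤ j)]
          simp [hpre]
        rw [if_pos hfe, hset]
        have hfun : (fun bst bs => stepAt n info j i s pre bst (1 :: bs))
            = stepAt n info (j + 1) (i + info.getD j 0 + 1) (s + 10 - (j : Int))
                (pre ++ [info.getD j 0 + 1]) := by
          funext bst bs
          rw [stepAt_one, if_neg (by omega : ¬ n - i ≤ info.getD j 0)]
        rw [hfun]
        exact ih (j + 1) (by omega) _ _ _ (by simp [hpre]) real result best hinv
      · rw [if_neg hfe]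
        have hfun : (fun bst bs => stepAt n info j i s pre bst (1 :: bs))
            = (fun (bst : Option ((Int × List Int) × List Int)) (_ : List Int) => bst) := by
          funext bst bs
          rw [stepAt_one, if_pos (by omega : n - i ≤ info.getD j 0)]
        rw [hfun, foldl_const]
        exact hinv
    -- the lose half continues from the state left by the win half
    have hfun0 : (fun bst bs => stepAt n info j i s pre bst (0 :: bs))
        = stepAt n info (j + 1) i (if info.getD j 0 ≠ 0 then s - 10 + (j : Int) else s)
            (pre ++ [0]) := by
      funext bst bs
      rw [stepAt_zero]
    rw [hfun0]
    have happ : (pre ++ [(0 : Int)]) ++ List.replicate k (0 : Int)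
        = pre ++ List.replicate (k + 1) 0 := by
      rw [show List.replicate (k + 1) (0 : Int) = 0 :: List.replicate k 0 from rfl]
      simp
    by_cases hij0 : info.getD j 0 = 0
    · rw [if_pos hij0, if_neg (not_not_intro hij0)]
      have hlose := ih (j + 1) (by omega) i s (pre ++ [0]) (by simp [hpre]) _ _ _ hwin
      rw [happ] at hlose
      exact hlose
    · rw [if_neg hij0, if_pos hij0]
      have hlose := ih (j + 1) (by omega) i (s - 10 + (j : Int)) (pre ++ [0]) (by simp [hpre]) _ _ _ hwin
      rw [happ] at hlose
      exact hlose

-- ===== VERDICT (by name: the statement is the Claim_ definition above) =====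
theorem solution_spec : Claim_equal_solution := by
  intro n info _hdom _hpre
  unfold Spec_solution
  have h := main_sim n info 11 0 rfl 0 0 [] rfl (List.replicate 11 0) 0 none (Or.inl ⟨rfl, rfl, rfl⟩)
  simp only [List.nil_append] at h
  simp only [solution, solution_alt, bitlists_foldl]
  have hstep : stepB n info = stepAt n info 0 0 0 [] := by
    funext bst bs; rfl
  rw [hstep]
  rcases h with ⟨h0, _, hbest⟩ | ⟨hpos, _, hbest⟩
  · rw [hbest, if_pos h0]
  · rw [hbest,
        if_neg (show ¬ (dfsA info n 0 0 0 (List.replicate 11 0) (List.replicate 11 0) 0).2 = 0 by omega)]
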